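-- pv_equiv track=rewrite | github.com/patrisiyarum/Flash-Inspector-AI | flashinspector-ai/prepare_dataset.py | build_class_mapping
-- ===== SOURCE A (Python) =====
-- CLASS_ALIASES = {
--     "fire extinguisher": "fire_extinguisher",
--     "fire_extinguisher": "fire_extinguisher",
--     "Fire_Extinguisher": "fire_extinguisher",
--     "fire blanket": "fire_blanket",
--     "fire_blanket": "fire_blanket",
--     "Fire_Blanket": "fire_blanket",
--     "smoke detector": "smoke_detector",
--     "smoke_detector": "smoke_detector",
--     "White_Domes": "smoke_detector",
--     "manual call point": "manual_call_point",
--     "manual_call_point": "manual_call_point",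
--     "Alarm_Activator": "manual_call_point",
--     "emergency exit sign": "emergency_exit",
--     "emergency_exit": "emergency_exit",
--     "Fire_Exit": "emergency_exit",
--     "Fire_Suppression_Signage": "fire_suppression_sign",
--     "Flashing_Light_Orbs": "flashing_light_orb",
--     "flashing_light_orb": "flashing_light_orb",
--     "Sounders": "sounder",
--     "yellow tag": "yellow_tag",
--     "yellow_tag": "yellow_tag",
--     "red tag": "red_tag",
--     "red_tag": "red_tag",
--     "white tag": "white_tag",
--     "white_tag": "white_tag",
--     "Emergency-Light": "emergency_light",
--     "emergency-light": "emergency_light",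
--     "emergency_light": "emergency_light",
--     "Alarm": "alarm",
--     "Alarm(Bell)": "alarm_bell",
--     "Alarm(Lever)": "alarm_lever",
--     "Alarm (Lever)": "alarm_lever",
--     "Fire-Extinguisher": "fire_extinguisher",
-- }
--
-- def _canonical(name: str) -> str:
--     """Return canonical class name, or original if no alias."""
--     return CLASS_ALIASES.get(name, CLASS_ALIASES.get(name.lower(), name))
--
-- def build_class_mapping(datasets: dict[str, list[str]]) -> tuple[list[str], dict[str, dict[int, int]]]:
--     """Build unified class list and per-dataset old->new ID mappings.
--     Aligns similar classes (e.g. Fire_Extinguisher, fire extinguisher) to one canonical name.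
--     """
--     unified_classes = []
--     seen = set()
--     for classes in datasets.values():
--         for c in classes:
--             canon = _canonical(c)
--             if canon not in seen:
--                 seen.add(canon)
--                 unified_classes.append(canon)
--
--     # Map old class IDs to new unified IDs (via canonical name)
--     mappings = {}
--     for name, classes in datasets.items():
--         mappings[name] = {}
--         for old_id, cls_name in enumerate(classes):
--             canon = _canonical(cls_name)
--             new_id = unified_classes.index(canon)
--             mappings[name][old_id] = new_id
--
--     return unified_classes, mappings
-- ===== SOURCE B (Python) =====
-- CLASS_ALIASES = {
--     "fire extinguisher": "fire_extinguisher",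
--     "fire_extinguisher": "fire_extinguisher",
--     "Fire_Extinguisher": "fire_extinguisher",
--     "fire blanket": "fire_blanket",
--     "fire_blanket": "fire_blanket",
--     "Fire_Blanket": "fire_blanket",
--     "smoke detector": "smoke_detector",
--     "smoke_detector": "smoke_detector",
--     "White_Domes": "smoke_detector",
--     "manual call point": "manual_call_point",
--     "manual_call_point": "manual_call_point",
--     "Alarm_Activator": "manual_call_point",
--     "emergency exit sign": "emergency_exit",
--     "emergency_exit": "emergency_exit",
--     "Fire_Exit": "emergency_exit",
--     "Fire_Suppression_Signage": "fire_suppression_sign",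
--     "Flashing_Light_Orbs": "flashing_light_orb",
--     "flashing_light_orb": "flashing_light_orb",
--     "Sounders": "sounder",
--     "yellow tag": "yellow_tag",
--     "yellow_tag": "yellow_tag",
--     "red tag": "red_tag",
--     "red_tag": "red_tag",
--     "white tag": "white_tag",
--     "white_tag": "white_tag",
--     "Emergency-Light": "emergency_light",
--     "emergency-light": "emergency_light",
--     "emergency_light": "emergency_light",
--     "Alarm": "alarm",
--     "Alarm(Bell)": "alarm_bell",
--     "Alarm(Lever)": "alarm_lever",
--     "Alarm (Lever)": "alarm_lever",
--     "Fire-Extinguisher": "fire_extinguisher",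
-- }
--
-- def _canonical(name: str) -> str:
--     return CLASS_ALIASES.get(name, CLASS_ALIASES.get(name.lower(), name))
--
-- def build_class_mapping(datasets):
--     """Single pass: unified list + canonical-name->new-id index + per-dataset mappings."""
--     unified_classes = []
--     index = {}
--     mappings = {}
--     for name, classes in datasets.items():
--         m = {}
--         for old_id, cls_name in enumerate(classes):
--             canon = _canonical(cls_name)
--             if canon not in index:
--                 index[canon] = len(unified_classes)
--                 unified_classes.append(canon)
--             m[old_id] = index[canon]
--         mappings[name] = m
--     return unified_classes, mappings
-- ===== Notes on version B (the rewrite author's own statement) =====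
-- stated objective: faster
-- what changed: Fuses A's two passes over datasets into one loop that builds the unified list and a canonical-name->id dict together, replacing A's repeated linear unified_classes.index() scans with O(1) dict lookups.
import Mathlib
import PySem

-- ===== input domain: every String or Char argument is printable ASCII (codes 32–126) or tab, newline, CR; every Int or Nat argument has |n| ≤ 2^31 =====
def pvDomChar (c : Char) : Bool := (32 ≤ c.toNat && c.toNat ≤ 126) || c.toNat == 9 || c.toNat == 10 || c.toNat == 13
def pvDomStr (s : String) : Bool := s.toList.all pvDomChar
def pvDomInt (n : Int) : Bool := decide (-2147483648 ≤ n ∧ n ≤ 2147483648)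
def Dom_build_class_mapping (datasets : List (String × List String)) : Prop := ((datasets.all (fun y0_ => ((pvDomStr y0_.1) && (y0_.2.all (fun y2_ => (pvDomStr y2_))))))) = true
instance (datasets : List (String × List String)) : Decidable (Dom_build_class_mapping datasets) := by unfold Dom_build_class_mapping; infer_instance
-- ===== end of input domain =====

-- B fuses A's two passes into one loop with a canonical-name->id dict instead of repeated
-- unified_classes.index() scans (objective: faster; both programs return, never mutate input).

-- shared helper (same in Source A and Source B): the CLASS_ALIASES dict and _canonical
def CLASS_ALIASES : PySem.Dict String String := PySem.Dict.mk [
  ("fire extinguisher", "fire_extinguisher"),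
  ("fire_extinguisher", "fire_extinguisher"),
  ("Fire_Extinguisher", "fire_extinguisher"),
  ("fire blanket", "fire_blanket"),
  ("fire_blanket", "fire_blanket"),
  ("Fire_Blanket", "fire_blanket"),
  ("smoke detector", "smoke_detector"),
  ("smoke_detector", "smoke_detector"),
  ("White_Domes", "smoke_detector"),
  ("manual call point", "manual_call_point"),
  ("manual_call_point", "manual_call_point"),
  ("Alarm_Activator", "manual_call_point"),
  ("emergency exit sign", "emergency_exit"),
  ("emergency_exit", "emergency_exit"),
  ("Fire_Exit", "emergency_exit"),
  ("Fire_Suppression_Signage", "fire_suppression_sign"),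
  ("Flashing_Light_Orbs", "flashing_light_orb"),
  ("flashing_light_orb", "flashing_light_orb"),
  ("Sounders", "sounder"),
  ("yellow tag", "yellow_tag"),
  ("yellow_tag", "yellow_tag"),
  ("red tag", "red_tag"),
  ("red_tag", "red_tag"),
  ("white tag", "white_tag"),
  ("white_tag", "white_tag"),
  ("Emergency-Light", "emergency_light"),
  ("emergency-light", "emergency_light"),
  ("emergency_light", "emergency_light"),
  ("Alarm", "alarm"),
  ("Alarm(Bell)", "alarm_bell"),
  ("Alarm(Lever)", "alarm_lever"),
  ("Alarm (Lever)", "alarm_lever"),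
  ("Fire-Extinguisher", "fire_extinguisher")]

def canonical (name : String) : String :=
  PySem.Dict.getD CLASS_ALIASES name (PySem.Dict.getD CLASS_ALIASES (PySem.Str.lower name) name)

-- ===== PORT A =====
-- A pass 1 loop body: 'canon = _canonical(c); if canon not in seen: seen.add(canon); unified_classes.append(canon)'
def aSeenStep (st : List String × PySem.Set String) (c : String) : List String × PySem.Set String :=
  let canon := canonical c
  if PySem.Set.contains st.2 canon then st else (st.1 ++ [canon], PySem.Set.add st.2 canon)

-- A pass 2 inner loop body: 'mappings[name][old_id] = unified_classes.index(_canonical(cls_name))'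
-- (.index never raises here: every canonical name was appended to unified_classes in pass 1,
--  so index? is always some; .getD 0 is only a total encoding of that)
def aMapItem (unified : List String) (m : PySem.Dict Int Int) (ic : Int × String) : PySem.Dict Int Int :=
  PySem.Dict.insert m ic.1 (((PySem.List.index? unified (canonical ic.2)).getD 0 : Nat) : Int)

def build_class_mapping (datasets : List (String × List String)) : List String × (List (String × List (Int × Int))) :=
  let p1 := datasets.foldl (fun st p => p.2.foldl aSeenStep st) ([], PySem.Set.empty)
  let unified := p1.1
  let mappings := datasets.foldl
    (fun (ms : PySem.Dict String (List (Int × Int))) p =>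
      PySem.Dict.insert ms p.1 ((PySem.List.enumerate p.2).foldl (aMapItem unified) (PySem.Dict.mk [])).items)
    (PySem.Dict.mk [])
  (unified, mappings.items)

-- ===== PORT B =====
-- B inner loop body: 'canon = _canonical(cls_name); if canon not in index:
--   index[canon] = len(unified_classes); unified_classes.append(canon); m[old_id] = index[canon]'
def bStep (st : List String × PySem.Dict String Int × PySem.Dict Int Int) (ic : Int × String) :
    List String × PySem.Dict String Int × PySem.Dict Int Int :=
  if PySem.Dict.contains st.2.1 (canonical ic.2) then
    (st.1, st.2.1, PySem.Dict.insert st.2.2 ic.1 (PySem.Dict.getD st.2.1 (canonical ic.2) 0))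
  else
    (st.1 ++ [canonical ic.2], PySem.Dict.insert st.2.1 (canonical ic.2) (st.1.length : Int),
     PySem.Dict.insert st.2.2 ic.1
       (PySem.Dict.getD (PySem.Dict.insert st.2.1 (canonical ic.2) (st.1.length : Int)) (canonical ic.2) 0))

-- B outer loop body: one dataset — 'm = {}; for old_id, cls_name in enumerate(classes): …; mappings[name] = m'
def bDataset (st : List String × PySem.Dict String Int × PySem.Dict String (List (Int × Int)))
    (p : String × List String) :
    List String × PySem.Dict String Int × PySem.Dict String (List (Int × Int)) :=
  let inner := (PySem.List.enumerate p.2).foldl bStep (st.1, st.2.1, PySem.Dict.mk [])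
  (inner.1, inner.2.1, PySem.Dict.insert st.2.2 p.1 inner.2.2.items)

def build_class_mapping_alt (datasets : List (String × List String)) : List String × (List (String × List (Int × Int))) :=
  let st := datasets.foldl bDataset ([], PySem.Dict.mk [], PySem.Dict.mk [])
  (st.1, st.2.2.items)

-- ===== PRECONDITION & SPEC =====
def Spec_build_class_mapping (datasets : List (String × List String)) (out : List String × (List (String × List (Int × Int)))) : Prop := out = build_class_mapping_alt datasets
instance (datasets : List (String × List String)) (out : List String × (List (String × List (Int × Int)))) : Decidable (Spec_build_class_mapping datasets out) := by unfold Spec_build_class_mapping; infer_instance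

-- ===== CLAIM (what is proved, stated in full; the proofs are below) =====
def Claim_equal_build_class_mapping : Prop := ∀ (datasets : List (String × List String)), Dom_build_class_mapping datasets → Spec_build_class_mapping datasets (build_class_mapping datasets)

-- ===== LEMMAS AND PROOFS =====

-- abstract "unified list" recurrences shared by the two proofs
def stepC (u : List String) (c : String) : List String :=
  if canonical c ∈ u then u else u ++ [canonical c]
def P1cs (u : List String) (cs : List String) : List String := cs.foldl stepC u
def P1 (u : List String) (ds : List (String × List String)) : List String :=
  ds.foldl (fun u p => P1cs u p.2) u

-- the index dict of B always tabulates index? of the running unified list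
def IdxInv (u : List String) (d : PySem.Dict String Int) : Prop :=
  ∀ c : String, d.get? c = (PySem.List.index? u c).map (fun k => (k : Int))

lemma index?_append_singleton_of_ne (u : List String) {c x : String} (h : x ≠ c) :
    PySem.List.index? (u ++ [c]) x = PySem.List.index? u x := by
  induction u with
  | nil => rw [List.nil_append, PySem.List.index?_cons_of_ne _ (Ne.symm h)]; simp
  | cons a t ih =>
    by_cases hax : a = x
    · subst hax; rw [List.cons_append, PySem.List.index?_cons_self, PySem.List.index?_cons_self]
    · rw [List.cons_append, PySem.List.index?_cons_of_ne _ hax, PySem.List.index?_cons_of_ne _ hax, ih]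

lemma inv_nil : IdxInv [] (PySem.Dict.mk []) := by
  intro c; simp [PySem.Dict.get?, PySem.List.index?_eq_idxOf?, List.idxOf?, List.findIdx?, List.findIdx?.go]

lemma inv_contains {u d} (h : IdxInv u d) (c : String) :
    PySem.Dict.contains d c = decide (c ∈ u) := by
  have hc : PySem.Dict.contains d c = (PySem.Dict.get? d c).isSome := by
    simp [PySem.Dict.contains, PySem.Dict.get?, List.isSome_find?]
  rw [hc, h c]
  by_cases hm : c ∈ u
  · have := (PySem.List.index?_isSome_iff u c).mpr hm
    cases hi : PySem.List.index? u c with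
    | none => rw [hi] at this; simp at this
    | some k => simp [hm]
  · rw [(PySem.List.index?_eq_none_iff u c).mpr hm]; simp [hm]

lemma inv_insert {u d} (h : IdxInv u d) {canon : String} (hc : canon ∉ u) :
    IdxInv (u ++ [canon]) (PySem.Dict.insert d canon (u.length : Int)) := by
  intro c
  by_cases hcc : c = canon
  · subst hcc
    rw [PySem.Dict.get?_insert_self, PySem.List.index?_append_singleton_self u _ hc]
    rfl
  · rw [PySem.Dict.get?_insert_of_ne d _ hcc, index?_append_singleton_of_ne u hcc, h c]

lemma prefix_stepC (u : List String) (c : String) : u <+: stepC u c := by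
  unfold stepC; split
  · exact List.prefix_refl u
  · exact List.prefix_append u _

lemma prefix_P1cs (u : List String) (cs : List String) : u <+: P1cs u cs := by
  induction cs generalizing u with
  | nil => exact List.prefix_refl u
  | cons c t ih => exact (prefix_stepC u c).trans (ih (stepC u c))

lemma prefix_P1 (u : List String) (ds : List (String × List String)) : u <+: P1 u ds := by
  induction ds generalizing u with
  | nil => exact List.prefix_refl u
  | cons p t ih => exact (prefix_P1cs u p.2).trans (ih _)

lemma index?_of_prefix {u U : List String} (hpre : u <+: U) {c : String} (hc : c ∈ u) :
    PySem.List.index? U c = PySem.List.index? u c := by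
  obtain ⟨t, rfl⟩ := hpre
  exact PySem.List.index?_append_of_mem t hc

-- folding stepC over the snd components of an enumerate list is P1cs
lemma foldU_enumerate (cs : List String) : ∀ (s : Int) (u : List String),
    (PySem.List.enumerate cs s).foldl (fun u ic => stepC u ic.2) u = P1cs u cs := by
  induction cs with
  | nil => intro s u; simp [PySem.List.enumerate_nil, P1cs]
  | cons c t ih => intro s u; rw [PySem.List.enumerate_cons]; exact ih (s + 1) (stepC u c)

-- A's pass 1: the 'seen' set always equals the unified list itself
lemma passA1_cs (cs : List String) : ∀ u : List String,
    cs.foldl aSeenStep (u, (u : PySem.Set String)) = (P1cs u cs, P1cs u cs) := by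
  induction cs with
  | nil => intro u; simp [P1cs]
  | cons c t ih =>
    intro u
    have hstep : aSeenStep (u, (u : PySem.Set String)) c = (stepC u c, stepC u c) := by
      unfold aSeenStep stepC PySem.Set.contains PySem.Set.add PySem.Set.contains
      by_cases hm : canonical c ∈ u
      · simp [hm]
      · simp [hm]
    rw [List.foldl_cons, hstep, ih (stepC u c)]; rfl

lemma passA1 (ds : List (String × List String)) : ∀ u : List String,
    ds.foldl (fun st p => p.2.foldl aSeenStep st) (u, (u : PySem.Set String)) = (P1 u ds, P1 u ds) := by
  induction ds with
  | nil => intro u; rfl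
  | cons p t ih => intro u; rw [List.foldl_cons, passA1_cs p.2 u]; exact ih (P1cs u p.2)

-- core: B's inner loop assigns exactly the ids A later reads off with .index on the final list U
lemma inner_eq (U : List String) : ∀ (pairs : List (Int × String)) (u : List String)
    (d : PySem.Dict String Int) (m : PySem.Dict Int Int), IdxInv u d →
    (pairs.foldl (fun u ic => stepC u ic.2) u) <+: U →
    ∃ d', pairs.foldl bStep (u, d, m) =
        (pairs.foldl (fun u ic => stepC u ic.2) u, d', pairs.foldl (aMapItem U) m) ∧
      IdxInv (pairs.foldl (fun u ic => stepC u ic.2) u) d' := by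
  intro pairs
  induction pairs with
  | nil => intro u d m h _; exact ⟨d, rfl, h⟩
  | cons ic rest ih =>
    intro u d m h hpre
    simp only [List.foldl_cons] at hpre ⊢
    by_cases hm : canonical ic.2 ∈ u
    · have hu : stepC u ic.2 = u := by simp [stepC, hm]
      rw [hu] at hpre ⊢
      obtain ⟨k, hk⟩ := Option.isSome_iff_exists.mp ((PySem.List.index?_isSome_iff u _).mpr hm)
      have hUix : PySem.List.index? U (canonical ic.2) = some k := by
        rw [index?_of_prefix ((prefix_P1cs u (rest.map (·.2))).trans (by
          simpa [P1cs, List.foldl_map] using hpre)) hm, hk]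
      have hb : bStep (u, d, m) ic = (u, d, PySem.Dict.insert m ic.1 ((k : Nat) : Int)) := by
        have hk' := hk
        rw [PySem.List.index?_eq_idxOf?] at hk'
        simp only [bStep, inv_contains h, hm, decide_true, if_true]
        simp [PySem.Dict.getD, h (canonical ic.2), hk']
      have ha : aMapItem U m ic = PySem.Dict.insert m ic.1 ((k : Nat) : Int) := by
        unfold aMapItem; rw [hUix]; rfl
      rw [hb, ha]
      exact ih u d _ h hpre
    · have hu : stepC u ic.2 = u ++ [canonical ic.2] := by simp [stepC, hm]
      rw [hu] at hpre ⊢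
      have hmem : canonical ic.2 ∈ u ++ [canonical ic.2] := by simp
      have hUix : PySem.List.index? U (canonical ic.2) = some u.length := by
        rw [index?_of_prefix ((prefix_P1cs _ (rest.map (·.2))).trans (by
          simpa [P1cs, List.foldl_map] using hpre)) hmem,
          PySem.List.index?_append_singleton_self u _ hm]
      have h' := inv_insert h hm
      have hb : bStep (u, d, m) ic =
          (u ++ [canonical ic.2], PySem.Dict.insert d (canonical ic.2) (u.length : Int),
           PySem.Dict.insert m ic.1 (u.length : Int)) := by
        simp only [bStep, inv_contains h, hm, decide_false, Bool.false_eq_true, if_false]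
        simp [PySem.Dict.getD, PySem.Dict.get?_insert_self]
      have ha : aMapItem U m ic = PySem.Dict.insert m ic.1 (u.length : Int) := by
        unfold aMapItem; rw [hUix]; rfl
      rw [hb, ha]
      exact ih _ _ _ h' hpre

lemma outer_eq (U : List String) : ∀ (ds : List (String × List String)) (u : List String)
    (d : PySem.Dict String Int) (ms : PySem.Dict String (List (Int × Int))), IdxInv u d →
    P1 u ds <+: U →
    ∃ d', ds.foldl bDataset (u, d, ms) =
        (P1 u ds, d',
         ds.foldl (fun ms p => PySem.Dict.insert ms p.1
           ((PySem.List.enumerate p.2).foldl (aMapItem U) (PySem.Dict.mk [])).items) ms) ∧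
      IdxInv (P1 u ds) d' := by
  intro ds
  induction ds with
  | nil => intro u d ms h _; exact ⟨d, rfl, h⟩
  | cons p rest ih =>
    intro u d ms h hpre
    have hP1 : P1 u (p :: rest) = P1 (P1cs u p.2) rest := rfl
    rw [hP1] at hpre ⊢
    have hpre1 : (PySem.List.enumerate p.2).foldl (fun u ic => stepC u ic.2) u <+: U := by
      rw [foldU_enumerate p.2 0 u]
      exact (prefix_P1 (P1cs u p.2) rest).trans hpre
    obtain ⟨d1, hres, hinv1⟩ := inner_eq U (PySem.List.enumerate p.2) u d (PySem.Dict.mk []) h hpre1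
    rw [foldU_enumerate p.2 0 u] at hres hinv1
    have hb : bDataset (u, d, ms) p =
        (P1cs u p.2, d1, PySem.Dict.insert ms p.1
          ((PySem.List.enumerate p.2).foldl (aMapItem U) (PySem.Dict.mk [])).items) := by
      unfold bDataset; rw [hres]
    rw [List.foldl_cons, hb, List.foldl_cons]
    exact ih (P1cs u p.2) d1 _ hinv1 hpre

-- ===== VERDICT (by name: the statement is the Claim_ definition above) =====
theorem build_class_mapping_spec : Claim_equal_build_class_mapping := by
  intro datasets _
  unfold Spec_build_class_mapping build_class_mapping build_class_mapping_alt
  have hA1 := passA1 datasets []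
  obtain ⟨d', hres, _⟩ := outer_eq (P1 [] datasets) datasets [] (PySem.Dict.mk [])
    (PySem.Dict.mk []) inv_nil (List.prefix_refl _)
  simp only [PySem.Set.empty] at hA1 ⊢
  rw [hA1, hres]
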